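-- pv_equiv track=rewrite | github.com/pallavisurana1/TSProm | src/3_attention/.ipynb_checkpoints/2A_save_meme-checkpoint.py | simple_gapless_score
-- ===== SOURCE A (Python) =====
-- def simple_gapless_score(a: str, b: str) -> int:
--     """Return number of matching characters in the best gap-free alignment of a and b."""
--     scores = []
--     len_a, len_b = len(a), len(b)
--     for i in range(-len_b + 1, len_a):
--         score = 0
--         for j in range(max(0, i), min(len_a, i + len_b)):
--             if a[j] == b[j - i]:
--                 score += 1
--         scores.append(score)
--     return max(scores) if scores else 0
-- ===== SOURCE B (Python) =====
-- def simple_gapless_score(a: str, b: str) -> int: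
--     """Return number of matching characters in the best gap-free alignment of a and b."""
--     # Bucket b's positions per character, then count matches per diagonal (offset i - j)
--     # with a counter, keeping a running maximum; only actual character matches are touched
--     pos = {}
--     for j, c in enumerate(b):
--         pos.setdefault(c, []).append(j)
--     diag = {}
--     best = 0
--     for i, c in enumerate(a):
--         for j in pos.get(c, []):
--             n = diag.get(i - j, 0) + 1
--             diag[i - j] = n
--             if n > best:
--                 best = n
--     return best
-- ===== Notes on version B (the rewrite author's own statement) =====
-- stated objective: alternative
-- what changed: Instead of scoring every offset with a nested loop over the overlap window, B indexes b's positions per character once and counts matches per diagonal in a dictionary with a running maximum, visiting only the actually-matching character pairs.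
import Mathlib
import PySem

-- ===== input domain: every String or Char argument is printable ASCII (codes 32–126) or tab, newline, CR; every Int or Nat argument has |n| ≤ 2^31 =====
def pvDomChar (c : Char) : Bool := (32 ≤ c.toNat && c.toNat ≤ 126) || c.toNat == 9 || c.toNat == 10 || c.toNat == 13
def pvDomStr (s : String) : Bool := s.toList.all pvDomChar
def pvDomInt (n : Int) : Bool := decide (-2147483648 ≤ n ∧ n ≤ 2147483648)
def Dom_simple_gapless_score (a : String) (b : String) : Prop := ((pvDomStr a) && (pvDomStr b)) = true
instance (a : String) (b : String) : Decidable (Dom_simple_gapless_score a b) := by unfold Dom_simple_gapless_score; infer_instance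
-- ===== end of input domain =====

-- ===== PORT A =====
-- B replaces A's offset-by-offset double loop by a per-character position index and a
-- diagonal counter with a running maximum (objective: alternative algorithm; it visits
-- only the matching character pairs instead of every offset/position combination).
def simple_gapless_score (a : String) (b : String) : Int :=
  let A := a.toList
  let B := b.toList
  let len_a : Int := PySem.List.len A
  let len_b : Int := PySem.List.len B
  let scores : List Int :=
    (PySem.List.pyRange (-len_b + 1) len_a 1).foldl (fun scores i =>
      let score : Int :=
        (PySem.List.pyRange (max 0 i) (min len_a (i + len_b)) 1).foldl
          (fun score j =>
            if PySem.List.pyGet? A j = PySem.List.pyGet? B (j - i) then score + 1 else score)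
          0
      scores ++ [score]) []
  match PySem.List.max? scores id with
  | some m => m
  | none => 0

-- ===== PORT B =====
def simple_gapless_score_alt (a : String) (b : String) : Int :=
  let pos : PySem.Dict Char (List Int) :=
    (PySem.List.enumerate b.toList).foldl
      (fun pos jc => pos.insert jc.2 (pos.getD jc.2 [] ++ [jc.1])) PySem.Dict.empty
  let st : PySem.Dict Int Int × Int :=
    (PySem.List.enumerate a.toList).foldl
      (fun st ic =>
        (pos.getD ic.2 []).foldl
          (fun st j =>
            let n := st.1.getD (ic.1 - j) 0 + 1
            (st.1.insert (ic.1 - j) n, if n > st.2 then n else st.2))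
          st)
      (PySem.Dict.empty, 0)
  st.2

-- ===== PRECONDITION & SPEC =====
def Spec_simple_gapless_score (a : String) (b : String) (out : Int) : Prop := out = simple_gapless_score_alt a b
instance (a : String) (b : String) (out : Int) : Decidable (Spec_simple_gapless_score a b out) := by unfold Spec_simple_gapless_score; infer_instance

-- ===== CLAIM (what is proved, stated in full; the proofs are below) =====
def Claim_equal_simple_gapless_score : Prop := ∀ (a : String) (b : String), Dom_simple_gapless_score a b → Spec_simple_gapless_score a b (simple_gapless_score a b)

-- ===== LEMMAS AND PROOFS =====

-- number of matching pairs on diagonal k (position j of a against position j - k of b)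
def pvCnt (A B : List Char) (k : Int) : Int :=
  ((PySem.List.pyRange 0 (PySem.List.len A) 1).countP (fun j =>
    decide (0 ≤ j - k) && decide (j - k < PySem.List.len B) &&
    decide (PySem.List.pyGetD A j ' ' = PySem.List.pyGetD B (j - k) ' ')) : Int)

-- B's inner-loop step on the (diagonal counter, best) state
def pvStep (st : PySem.Dict Int Int × Int) (p : Int × Int) : PySem.Dict Int Int × Int :=
  let n := st.1.getD (p.1 - p.2) 0 + 1
  (st.1.insert (p.1 - p.2) n, if n > st.2 then n else st.2)

-- B's bucket of b-positions per character
def pvPos (B : List Char) : PySem.Dict Char (List Int) :=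
  (PySem.List.enumerate B).foldl
    (fun pos jc => pos.insert jc.2 (pos.getD jc.2 [] ++ [jc.1])) PySem.Dict.empty

-- the list of matched (i, j) pairs B's two nested loops visit, in order
def pvPairs (A B : List Char) : List (Int × Int) :=
  (PySem.List.enumerate A).flatMap (fun ic => ((pvPos B).getD ic.2 []).map (fun j => (ic.1, j)))

lemma pvCnt_nonneg (A B : List Char) (k : Int) : 0 ≤ pvCnt A B k := by
  simp [pvCnt]

-- A's inner loop computes pvCnt on offsets of A's outer range
lemma pvScore_eq_cnt (A B : List Char) (i : Int)
    (h1 : -(PySem.List.len B) + 1 ≤ i) (h2 : i < PySem.List.len A) :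
    (PySem.List.pyRange (max 0 i) (min (PySem.List.len A) (i + PySem.List.len B)) 1).foldl
      (fun score j =>
        if PySem.List.pyGet? A j = PySem.List.pyGet? B (j - i) then score + 1 else score)
      0
    = pvCnt A B i := by
  have hla : (0:Int) ≤ PySem.List.len A := by simp [PySem.List.len_eq]
  have hlb : (0:Int) ≤ PySem.List.len B := by simp [PySem.List.len_eq]
  rw [PySem.List.foldl_ite_add_one]
  have hm1 : (0:Int) ≤ max 0 i := le_max_left 0 i
  have hm12 : max 0 i ≤ min (PySem.List.len A) (i + PySem.List.len B) := by omega
  have hm2 : min (PySem.List.len A) (i + PySem.List.len B) ≤ PySem.List.len A := min_le_left _ _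
  rw [pvCnt, PySem.List.pyRange_one_append 0 (max 0 i) (PySem.List.len A) hm1 (le_trans hm12 hm2),
      PySem.List.pyRange_one_append (max 0 i) (min (PySem.List.len A) (i + PySem.List.len B)) (PySem.List.len A) hm12 hm2]
  rw [List.countP_append, List.countP_append]
  have hleft : (PySem.List.pyRange 0 (max 0 i) 1).countP (fun j =>
      decide (0 ≤ j - i) && decide (j - i < PySem.List.len B) &&
      decide (PySem.List.pyGetD A j ' ' = PySem.List.pyGetD B (j - i) ' ')) = 0 := by
    rw [List.countP_eq_zero]
    intro j hj
    rw [PySem.List.mem_pyRange_one] at hj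
    simp only [Bool.and_eq_true, decide_eq_true_eq, not_and]
    intro h _; omega
  have hright : (PySem.List.pyRange (min (PySem.List.len A) (i + PySem.List.len B)) (PySem.List.len A) 1).countP (fun j =>
      decide (0 ≤ j - i) && decide (j - i < PySem.List.len B) &&
      decide (PySem.List.pyGetD A j ' ' = PySem.List.pyGetD B (j - i) ' ')) = 0 := by
    rw [List.countP_eq_zero]
    intro j hj
    rw [PySem.List.mem_pyRange_one] at hj
    simp only [Bool.and_eq_true, decide_eq_true_eq, not_and]
    intro _ h; omega
  rw [hleft, hright]
  have hmid : ∀ j ∈ PySem.List.pyRange (max 0 i) (min (PySem.List.len A) (i + PySem.List.len B)) 1,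
      ((decide (PySem.List.pyGet? A j = PySem.List.pyGet? B (j - i))) = true ↔
      (decide (0 ≤ j - i) && decide (j - i < PySem.List.len B) &&
       decide (PySem.List.pyGetD A j ' ' = PySem.List.pyGetD B (j - i) ' ')) = true) := by
    intro j hj
    rw [PySem.List.mem_pyRange_one] at hj
    have hj0 : 0 ≤ j := by omega
    have hjA : j < PySem.List.len A := by omega
    have hji0 : 0 ≤ j - i := by omega
    have hjiB : j - i < PySem.List.len B := by omega
    have hA : j < (A.length : Int) := by simpa [PySem.List.len_eq] using hjA
    have hB : j - i < (B.length : Int) := by simpa [PySem.List.len_eq] using hjiB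
    rw [PySem.List.pyGet?_eq_some_getElem A hj0 hA, PySem.List.pyGet?_eq_some_getElem B hji0 hB,
        PySem.List.pyGetD_eq_getElem A ' ' hj0 hA, PySem.List.pyGetD_eq_getElem B ' ' hji0 hB]
    simp only [Option.some.injEq, Bool.and_eq_true, decide_eq_true_eq]
    constructor
    · intro h; exact ⟨⟨by omega, by simpa [PySem.List.len_eq] using hjiB⟩, h⟩
    · intro h; exact h.2
  rw [List.countP_congr hmid]
  omega

-- the bucket for c holds exactly the indices of c in b, in order
lemma pvPos_getD (B : List Char) (c : Char) :
    (pvPos B).getD c [] =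
      (PySem.List.pyRange 0 (PySem.List.len B) 1).filter (fun q => PySem.List.pyGetD B q ' ' == c) := by
  have h1 : pvPos B = ((PySem.List.enumerate B).map Prod.swap).foldl
      (fun pos p => pos.modify p.1 [] (· ++ [p.2])) PySem.Dict.empty := by
    rw [List.foldl_map]; rfl
  rw [h1, PySem.Dict.getD_foldl_modify_append]
  rw [PySem.List.enumerate_eq_map_pyRange B ' ']
  simp [List.map_map, List.filter_map, Function.comp_def]

-- B's nested loops are a single fold of pvStep over pvPairs
lemma pvAlt_eq_fold (a b : String) :
    simple_gapless_score_alt a b = ((pvPairs a.toList b.toList).foldl pvStep (PySem.Dict.empty, 0)).2 := by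
  simp only [simple_gapless_score_alt, pvPairs, pvPos, List.foldl_flatMap, List.foldl_map]
  rfl

-- the pair list carries exactly pvCnt k pairs on diagonal k
lemma pvPairs_countP (A B : List Char) (k : Int) :
    ((pvPairs A B).countP (fun p => p.1 - p.2 == k) : Int) = pvCnt A B k := by
  rw [pvPairs, List.countP_flatMap, PySem.List.enumerate_eq_map_pyRange A ' ', List.map_map]
  have hfun : ∀ i ∈ PySem.List.pyRange 0 (PySem.List.len A) 1,
      ((List.countP (fun p : Int × Int => p.1 - p.2 == k) ∘
        fun ic : Int × Char => ((pvPos B).getD ic.2 []).map (fun j => (ic.1, j))) ∘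
        fun j => (j, PySem.List.pyGetD A j ' ')) i
      = (fun i => if (decide (0 ≤ i - k) && decide (i - k < PySem.List.len B) &&
            decide (PySem.List.pyGetD A i ' ' = PySem.List.pyGetD B (i - k) ' ')) then 1 else 0) i := by
    intro i _
    simp only [Function.comp_apply, List.countP_map, pvPos_getD]
    have hcomp : ((fun p : Int × Int => p.1 - p.2 == k) ∘ fun j => (i, j)) = fun j : Int => i - j == k := rfl
    rw [hcomp]
    set l := (PySem.List.pyRange 0 (PySem.List.len B) 1).filter
        (fun q => PySem.List.pyGetD B q ' ' == PySem.List.pyGetD A i ' ') with hl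
    have hnodup : l.Nodup := (PySem.List.nodup_pyRange_one 0 (PySem.List.len B)).filter _
    have hcongr : ∀ j ∈ l, ((i - j == k) = true ↔ (j == i - k) = true) := by
      intro j _; simp; omega
    rw [List.countP_congr hcongr, ← List.count_eq_countP]
    by_cases hmem : (i - k) ∈ l
    · rw [List.count_eq_one_of_mem hnodup hmem]
      have := hmem
      rw [hl, List.mem_filter, PySem.List.mem_pyRange_one] at this
      obtain ⟨⟨hm1, hm2⟩, hm3⟩ := this
      simp only [beq_iff_eq] at hm3
      have hcond : (decide (0 ≤ i - k) && decide (i - k < PySem.List.len B) &&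
            decide (PySem.List.pyGetD A i ' ' = PySem.List.pyGetD B (i - k) ' ')) = true := by
        simp only [Bool.and_eq_true, decide_eq_true_eq]
        exact ⟨⟨hm1, hm2⟩, hm3.symm⟩
      rw [if_pos hcond]
    · by_cases hcond : (decide (0 ≤ i - k) && decide (i - k < PySem.List.len B) &&
            decide (PySem.List.pyGetD A i ' ' = PySem.List.pyGetD B (i - k) ' ')) = true
      · exfalso
        apply hmem
        simp only [Bool.and_eq_true, decide_eq_true_eq] at hcond
        rw [hl, List.mem_filter, PySem.List.mem_pyRange_one]
        exact ⟨⟨hcond.1.1, hcond.1.2⟩, by simp [hcond.2.symm]⟩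
      · rw [List.count_eq_zero_of_not_mem hmem, if_neg hcond]
  rw [List.map_congr_left hfun, PySem.List.sum_map_ite_one_zero_nat]
  rfl

-- counter invariant: the fold adds, per diagonal, the number of visited pairs on it
lemma pvFold_getD (L : List (Int × Int)) (d : PySem.Dict Int Int) (m : Int) (k : Int) :
    ((L.foldl pvStep (d, m)).1).getD k 0 = d.getD k 0 + (L.countP (fun p => p.1 - p.2 == k) : Int) := by
  induction L generalizing d m with
  | nil => simp
  | cons p L ih =>
    simp only [List.foldl_cons, List.countP_cons, pvStep]
    rw [ih]
    rcases eq_or_ne k (p.1 - p.2) with hk | hk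
    · simp [hk]; omega
    · rw [PySem.Dict.getD_insert, if_neg hk]; simp [Ne.symm hk]

-- running-max invariant: best is the supremum of the counter's values (0 when none)
def pvGood (d : PySem.Dict Int Int) (m : Int) : Prop :=
  0 ≤ m ∧ (∀ k, 0 ≤ d.getD k 0) ∧ (∀ k, d.getD k 0 ≤ m) ∧ (m = 0 ∨ ∃ k, d.getD k 0 = m)

lemma pvStep_good (d : PySem.Dict Int Int) (m : Int) (p : Int × Int) (h : pvGood d m) :
    pvGood (pvStep (d, m) p).1 (pvStep (d, m) p).2 := by
  obtain ⟨h0, hnn, hub, hat⟩ := h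
  have hc := hnn (p.1 - p.2)
  have hcu := hub (p.1 - p.2)
  simp only [pvStep]
  by_cases hgt : d.getD (p.1 - p.2) 0 + 1 > m
  · refine ⟨by omega, ?_, ?_, Or.inr ⟨p.1 - p.2, ?_⟩⟩
    · intro k
      rw [PySem.Dict.getD_insert]
      split_ifs with hk
      · omega
      · exact hnn k
    · intro k
      rw [PySem.Dict.getD_insert]
      split_ifs with hk
      · simp
      · have := hub k; simp; omega
    · rw [PySem.Dict.getD_insert]
      simp
      omega
  · have hm : ¬ (m = 0) := by omega
    rcases hat with h0' | ⟨k1, hk1⟩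
    · omega
    · have hk1ne : k1 ≠ p.1 - p.2 := by
        intro he; rw [he] at hk1; omega
      refine ⟨by omega, ?_, ?_, Or.inr ⟨k1, ?_⟩⟩
      · intro k
        rw [PySem.Dict.getD_insert]
        split_ifs with hk
        · omega
        · exact hnn k
      · intro k
        rw [PySem.Dict.getD_insert]
        split_ifs with hk
        · simp; omega
        · have := hub k; simp; omega
      · rw [PySem.Dict.getD_insert]
        simp [hgt, hk1ne, hk1]

lemma pvFold_good (L : List (Int × Int)) (d : PySem.Dict Int Int) (m : Int)
    (h : pvGood d m) : pvGood (L.foldl pvStep (d, m)).1 (L.foldl pvStep (d, m)).2 := by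
  induction L generalizing d m with
  | nil => simpa
  | cons p L ih =>
    have hs := pvStep_good d m p h
    simpa [List.foldl_cons] using ih (pvStep (d, m) p).1 (pvStep (d, m) p).2 hs

-- A's result as the maximum of pvCnt over its offset range
lemma pvA_eq (a b : String) :
    simple_gapless_score a b =
      match PySem.List.max? ((PySem.List.pyRange (-(PySem.List.len b.toList) + 1) (PySem.List.len a.toList) 1).map (pvCnt a.toList b.toList)) id with
      | some m => m
      | none => 0 := by
  simp only [simple_gapless_score, PySem.List.foldl_append_singleton_eq_map, List.nil_append]
  have hmap : (PySem.List.pyRange (-(PySem.List.len b.toList) + 1) (PySem.List.len a.toList) 1).map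
      (fun i => (PySem.List.pyRange (max 0 i) (min (PySem.List.len a.toList) (i + PySem.List.len b.toList)) 1).foldl
        (fun score j =>
          if PySem.List.pyGet? a.toList j = PySem.List.pyGet? b.toList (j - i) then score + 1 else score) 0)
      = (PySem.List.pyRange (-(PySem.List.len b.toList) + 1) (PySem.List.len a.toList) 1).map (pvCnt a.toList b.toList) := by
    apply List.map_congr_left
    intro i hi
    rw [PySem.List.mem_pyRange_one] at hi
    exact pvScore_eq_cnt a.toList b.toList i (by omega) hi.2
  rw [hmap]

-- ===== VERDICT (by name: the statement is the Claim_ definition above) =====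
theorem simple_gapless_score_spec : Claim_equal_simple_gapless_score := by
  intro a b _hdom
  unfold Spec_simple_gapless_score
  rw [pvA_eq, pvAlt_eq_fold]
  have hla : (0:Int) ≤ PySem.List.len a.toList := by simp [PySem.List.len_eq]
  have hlb : (0:Int) ≤ PySem.List.len b.toList := by simp [PySem.List.len_eq]
  have hgood := pvFold_good (pvPairs a.toList b.toList) PySem.Dict.empty 0
    ⟨le_refl 0, by simp, by simp, Or.inl rfl⟩
  obtain ⟨hb0, hnn, hub, hat⟩ := hgood
  have hget : ∀ k, ((pvPairs a.toList b.toList).foldl pvStep (PySem.Dict.empty, 0)).1.getD k 0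
      = pvCnt a.toList b.toList k := by
    intro k
    rw [pvFold_getD, pvPairs_countP]
    simp
  -- pvCnt is zero outside the offset range
  have hcnt_pos : ∀ k, 0 < pvCnt a.toList b.toList k →
      -(PySem.List.len b.toList) + 1 ≤ k ∧ k < PySem.List.len a.toList := by
    intro k hk
    rw [pvCnt] at hk
    have : 0 < (PySem.List.pyRange 0 (PySem.List.len a.toList) 1).countP (fun j =>
        decide (0 ≤ j - k) && decide (j - k < PySem.List.len b.toList) &&
        decide (PySem.List.pyGetD a.toList j ' ' = PySem.List.pyGetD b.toList (j - k) ' ')) := by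
      exact_mod_cast hk
    obtain ⟨j, hjmem, hjp⟩ := List.countP_pos_iff.mp this
    rw [PySem.List.mem_pyRange_one] at hjmem
    simp only [Bool.and_eq_true, decide_eq_true_eq] at hjp
    omega
  cases hmax : PySem.List.max? ((PySem.List.pyRange (-(PySem.List.len b.toList) + 1) (PySem.List.len a.toList) 1).map (pvCnt a.toList b.toList)) id with
  | none =>
    show (0:Int) = _
    rcases hat with h0 | ⟨k, hk⟩
    · exact h0.symm
    · rw [hget k] at hk
      rcases lt_or_eq_of_le (pvCnt_nonneg a.toList b.toList k) with hpos | hzero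
      · exfalso
        obtain ⟨hk1, hk2⟩ := hcnt_pos k hpos
        have hmem : pvCnt a.toList b.toList k ∈
            (PySem.List.pyRange (-(PySem.List.len b.toList) + 1) (PySem.List.len a.toList) 1).map (pvCnt a.toList b.toList) := by
          exact List.mem_map_of_mem (PySem.List.mem_pyRange_one.mpr ⟨hk1, hk2⟩)
        rw [(PySem.List.max?_eq_none_iff _ id).mp hmax] at hmem
        exact absurd hmem (List.not_mem_nil)
      · omega
  | some m =>
    show m = _
    have hmem := PySem.List.max?_mem hmax
    obtain ⟨k0, hk0mem, hk0⟩ := List.mem_map.mp hmem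
    have hmle : m ≤ ((pvPairs a.toList b.toList).foldl pvStep (PySem.Dict.empty, 0)).2 := by
      rw [← hk0]
      rw [← hget k0]
      exact hub k0
    have hlem : ((pvPairs a.toList b.toList).foldl pvStep (PySem.Dict.empty, 0)).2 ≤ m := by
      rcases hat with h0 | ⟨k, hk⟩
      · rw [h0, ← hk0]
        exact pvCnt_nonneg a.toList b.toList k0
      · rw [← hk]
        rw [hget k]
        rcases lt_or_eq_of_le (pvCnt_nonneg a.toList b.toList k) with hpos | hzero
        · obtain ⟨hk1, hk2⟩ := hcnt_pos k hpos
          have hmemk : pvCnt a.toList b.toList k ∈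
              (PySem.List.pyRange (-(PySem.List.len b.toList) + 1) (PySem.List.len a.toList) 1).map (pvCnt a.toList b.toList) := by
            exact List.mem_map_of_mem (PySem.List.mem_pyRange_one.mpr ⟨hk1, hk2⟩)
          simpa using PySem.List.max?_isMax hmax _ hmemk
        · rw [← hzero, ← hk0]
          exact pvCnt_nonneg a.toList b.toList k0
    exact le_antisymm hmle hlem
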